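-- pv_equiv track=rewrite | github.com/shubhamdixena/nexus | process_alumni_migration.py | create_batch_migration
-- ===== SOURCE A (Python) =====
-- def create_batch_migration(statements, batch_size=50):
--     """Create batched migration SQL"""
--     batches = []
--     for i in range(0, len(statements), batch_size):
--         batch = statements[i:i+batch_size]
--         # Add ON CONFLICT DO NOTHING to each statement to avoid duplicates
--         modified_batch = []
--         for stmt in batch:
--             if 'ON CONFLICT DO NOTHING' not in stmt:
--                 stmt = stmt.rstrip(';') + '\nON CONFLICT DO NOTHING;'
--             modified_batch.append(stmt)
--         batches.append('\n\n'.join(modified_batch))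
--     return batches
-- ===== SOURCE B (Python) =====
-- def create_batch_migration(statements, batch_size=50):
--     """Create batched migration SQL"""
--     if batch_size <= 0:
--         return []
--     batches = []
--     cur = ''
--     count = 0
--     for stmt in statements:
--         if 'ON CONFLICT DO NOTHING' not in stmt:
--             stmt = stmt.rstrip(';') + '\nON CONFLICT DO NOTHING;'
--         if count == 0:
--             cur = stmt
--         else:
--             cur += '\n\n' + stmt
--         count += 1
--         if count == batch_size:
--             batches.append(cur)
--             cur = ''
--             count = 0
--     if count > 0:
--         batches.append(cur)
--     return batches
-- ===== Notes on version B (the rewrite author's own statement) =====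
-- stated objective: alternative
-- what changed: Replaces A's index-range chunking (outer loop over range(0,len,batch_size) that slices and joins each batch) with a single streaming pass that never slices or joins: one accumulator string is grown statement by statement and flushed whenever the running count reaches batch_size, with a final flush for the partial batch; Pre_ excludes batch_size == 0, where Python's range() raises ValueError.
import Mathlib
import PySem

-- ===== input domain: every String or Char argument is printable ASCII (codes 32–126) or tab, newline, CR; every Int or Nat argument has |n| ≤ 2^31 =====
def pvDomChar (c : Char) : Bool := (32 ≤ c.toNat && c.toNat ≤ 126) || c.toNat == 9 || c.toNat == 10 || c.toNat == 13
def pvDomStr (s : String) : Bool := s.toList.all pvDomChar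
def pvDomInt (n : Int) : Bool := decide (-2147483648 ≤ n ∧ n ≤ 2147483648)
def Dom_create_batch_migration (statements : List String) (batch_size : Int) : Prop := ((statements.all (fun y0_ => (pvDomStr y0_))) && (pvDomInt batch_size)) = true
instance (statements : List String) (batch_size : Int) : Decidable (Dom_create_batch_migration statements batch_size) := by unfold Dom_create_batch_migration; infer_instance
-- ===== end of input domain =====

-- B replaces A's range/slice chunking by a single streaming pass with one accumulator string,
-- flushed every batch_size statements (objective: alternative, same cost).

-- ===== PORT A =====
-- stmt.rstrip(';') ported by hand as reverse/dropWhile/reverse: exact, since the strip set is the single char ';'.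
def create_batch_migration (statements : List String) (batch_size : Int) : List String :=
  (PySem.List.pyRange 0 statements.length batch_size).foldl (fun batches i =>
    let batch := PySem.List.slice statements (some i) (some (i + batch_size))
    let modified_batch := batch.foldl (fun acc stmt =>
      let stmt :=
        if !(PySem.Str.isIn "ON CONFLICT DO NOTHING" stmt) then
          String.ofList ((stmt.toList.reverse.dropWhile (· == ';')).reverse
                     ++ ("\nON CONFLICT DO NOTHING;").toList)
        else stmt
      acc ++ [stmt]) []
    batches ++ [PySem.Str.join "\n\n" modified_batch]) []

-- ===== PORT B =====
-- the body of B's for-loop: state = (batches, cur, count);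
-- 'cur + "\n\n" + stmt' ported as one String.ofList of the concatenated char lists (exact: + on str is concatenation).
def pvStepB (batch_size : Int) (s : List String × String × Int) (stmt : String) : List String × String × Int :=
  let stmt :=
    if !(PySem.Str.isIn "ON CONFLICT DO NOTHING" stmt) then
      String.ofList ((stmt.toList.reverse.dropWhile (· == ';')).reverse
                 ++ ("\nON CONFLICT DO NOTHING;").toList)
    else stmt
  let cur := if s.2.2 == 0 then stmt
             else String.ofList (s.2.1.toList ++ ("\n\n").toList ++ stmt.toList)
  let count := s.2.2 + 1
  if count == batch_size then (s.1 ++ [cur], "", 0) else (s.1, cur, count)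

-- the trailing 'if count > 0: batches.append(cur)'
def pvFinal (st : List String × String × Int) : List String :=
  if st.2.2 > 0 then st.1 ++ [st.2.1] else st.1

def create_batch_migration_alt (statements : List String) (batch_size : Int) : List String :=
  if batch_size ≤ 0 then []
  else pvFinal (statements.foldl (pvStepB batch_size) ([], "", 0))

-- ===== PRECONDITION & SPEC =====
-- Pre_ excludes exactly batch_size = 0, where Python's range(0, len, 0) raises ValueError.
def Pre_create_batch_migration (_statements : List String) (batch_size : Int) : Prop := batch_size ≠ 0
instance (statements : List String) (batch_size : Int) : Decidable (Pre_create_batch_migration statements batch_size) := by unfold Pre_create_batch_migration; infer_instance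
def pvWitness_create_batch_migration : List String × Int := (["INSERT INTO t VALUES (1);"], 2)

def Spec_create_batch_migration (statements : List String) (batch_size : Int) (out : List String) : Prop := out = create_batch_migration_alt statements batch_size
instance (statements : List String) (batch_size : Int) (out : List String) : Decidable (Spec_create_batch_migration statements batch_size out) := by unfold Spec_create_batch_migration; infer_instance

-- ===== CLAIM (what is proved, stated in full; the proofs are below) =====
def Claim_equal_create_batch_migration : Prop := ∀ (statements : List String) (batch_size : Int), Dom_create_batch_migration statements batch_size → Pre_create_batch_migration statements batch_size → Spec_create_batch_migration statements batch_size (create_batch_migration statements batch_size)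

-- ===== LEMMAS AND PROOFS =====

-- the per-statement transformation both programs perform
def pvFix (stmt : String) : String :=
  if !(PySem.Str.isIn "ON CONFLICT DO NOTHING" stmt) then
    String.ofList ((stmt.toList.reverse.dropWhile (· == ';')).reverse
               ++ ("\nON CONFLICT DO NOTHING;").toList)
  else stmt

-- reference shape both ports are reduced to: peel batches of bn off the front, join each
def pvCj (bn : Nat) (ys : List String) : List String :=
  if _h : ys = [] then []
  else PySem.Str.join "\n\n" ((ys.take bn).map pvFix) :: pvCj bn (ys.drop (max bn 1))
termination_by ys.length
decreasing_by
  simp only [List.length_drop]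
  have : ys.length ≠ 0 := by simpa [List.length_eq_zero_iff] using _h
  omega

theorem pv_chars_join_snoc (sep x : List Char) (l : List (List Char)) (h : l ≠ []) :
    PySem.Chars.join sep (l ++ [x]) = PySem.Chars.join sep l ++ sep ++ x := by
  induction l with
  | nil => exact absurd rfl h
  | cons a t ih =>
    cases t with
    | nil => simp [PySem.Chars.join_cons_cons, PySem.Chars.join_singleton]
    | cons b t' =>
      have h2 : (a :: b :: t') ++ [x] = a :: (b :: t') ++ [x] := by simp
      rw [h2]
      rw [show a :: (b :: t') ++ [x] = a :: ((b :: t') ++ [x]) from by simp]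
      rw [show (b :: t') ++ [x] = b :: (t' ++ [x]) from by simp]
      rw [PySem.Chars.join_cons_cons]
      rw [show (b : List Char) :: (t' ++ [x]) = (b :: t') ++ [x] from by simp]
      rw [ih (by simp), PySem.Chars.join_cons_cons]
      simp [List.append_assoc]

theorem pv_join_nil (sep : String) : PySem.Str.join sep [] = "" := by
  simp [PySem.Str.join, PySem.Chars.join_nil]

theorem pv_join_singleton (sep x : String) : PySem.Str.join sep [x] = x := by
  simp [PySem.Str.join, PySem.Chars.join_singleton, String.ofList_toList]

theorem pv_join_snoc (sep x : String) (ps : List String) (h : ps ≠ []) :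
    PySem.Str.join sep (ps ++ [x]) =
      String.ofList ((PySem.Str.join sep ps).toList ++ sep.toList ++ x.toList) := by
  simp only [PySem.Str.join, List.map_append, List.map_cons, List.map_nil,
    String.toList_ofList]
  rw [pv_chars_join_snoc _ _ _ (by simpa using h)]

-- the number of batches A's range produces
def pvCount (bn m : Nat) : Nat := if m = 0 then 0 else (m - 1) / bn + 1

theorem pv_count_drop (bn m : Nat) (hb : 0 < bn) (hm : m ≠ 0) :
    pvCount bn m = pvCount bn (m - bn) + 1 := by
  unfold pvCount
  by_cases hle : m ≤ bn
  · have h1 : m - 1 < bn := by omega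
    simp [hm, Nat.sub_eq_zero_of_le hle, Nat.div_eq_of_lt h1]
  · have h2 : m - bn ≠ 0 := by omega
    have h3 : m - 1 = (m - bn - 1) + bn := by omega
    simp only [hm, if_false, h2, h3, Nat.add_div_right _ hb]

theorem pv_range_chunk (bn : Nat) (hb : 0 < bn) (ys : List String) :
    (List.range (pvCount bn ys.length)).map
      (fun k => PySem.Str.join "\n\n" (((ys.drop (bn * k)).take bn).map pvFix)) = pvCj bn ys := by
  cases hys : ys with
  | nil => simp [pvCount, pvCj]
  | cons y t =>
    have hne : (y :: t : List String) ≠ [] := by simp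
    have hmax : max bn 1 = bn := by omega
    rw [pv_count_drop bn _ hb (by simp), List.range_succ_eq_map, List.map_cons, List.map_map,
        pvCj, dif_neg hne, hmax]
    refine congrArg₂ List.cons ?_ ?_
    · norm_num
    · have hrec := pv_range_chunk bn hb ((y :: t).drop bn)
      rw [List.length_drop] at hrec
      rw [← hrec]
      apply List.map_congr_left
      intro k _
      simp only [Function.comp_apply, Nat.succ_eq_add_one]
      rw [List.drop_drop]
      rw [show bn * (k + 1) = bn + bn * k from by ring]
termination_by ys.length
decreasing_by simp only [List.length_cons, List.length_drop]; omega

-- A's port, at a positive batch size, is the peel-and-join shape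
theorem pv_A_eq_cj (stmts : List String) (bn : Nat) (hb : 0 < bn) :
    create_batch_migration stmts (bn : Int) = pvCj bn stmts := by
  unfold create_batch_migration
  rw [PySem.List.foldl_append_singleton_eq_map, List.nil_append]
  rw [PySem.List.pyRange_of_pos _ _ (by exact_mod_cast hb : (0:Int) < (bn : Int))]
  have hcount : (if (0:Int) < (stmts.length : Int)
        then (((stmts.length : Int) - 0 + (bn : Int) - 1) / (bn : Int)).toNat else 0)
      = pvCount bn stmts.length := by
    by_cases h0 : stmts.length = 0
    · simp [h0, pvCount]
    · have h1 : (0 : Int) < (stmts.length : Int) := by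
        exact_mod_cast Nat.pos_of_ne_zero h0
      rw [if_pos h1]
      have h2 : ((stmts.length : Int) - 0 + (bn : Int) - 1) =
          ((stmts.length - 1 + bn : Nat) : Int) := by
        have := Nat.pos_of_ne_zero h0
        push_cast; omega
      rw [h2, ← Int.natCast_ediv, Int.toNat_natCast]
      unfold pvCount
      rw [if_neg h0, Nat.add_div_right _ hb]
  have hfun : (fun k : Nat => (0:Int) + (bn : Int) * (k : Int))
      = fun k : Nat => ((bn * k : Nat) : Int) := by
    funext k; push_cast; ring
  rw [hcount, hfun, List.map_map, ← pv_range_chunk bn hb stmts]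
  apply List.map_congr_left
  intro k _
  simp only [Function.comp_apply]
  have hsl : PySem.List.slice stmts (some ((bn * k : Nat) : Int))
      (some (((bn * k : Nat) : Int) + (bn : Int))) = (stmts.drop (bn * k)).take bn :=
    PySem.List.slice_natCast_add stmts (bn * k) bn
  rw [hsl, PySem.List.foldl_append_singleton_eq_map, List.nil_append]
  rfl

-- the loop-body helper evaluated on the invariant state: the pending batch grows…
theorem pv_step_grow (bn : Nat) (p : List String) (batches : List String) (s : String)
    (h : p.length + 1 ≠ bn) :
    pvStepB (bn : Int) (batches, PySem.Str.join "\n\n" (p.map pvFix), (p.length : Int)) s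
      = (batches, PySem.Str.join "\n\n" ((p ++ [s]).map pvFix), ((p ++ [s]).length : Int)) := by
  unfold pvStepB
  have hbeq : (((p.length : Int) + 1) == (bn : Int)) = false := by
    simp; omega
  have hcur : (if ((p.length : Int) == 0) then pvFix s
        else String.ofList ((PySem.Str.join "\n\n" (p.map pvFix)).toList
          ++ ("\n\n").toList ++ (pvFix s).toList))
      = PySem.Str.join "\n\n" ((p ++ [s]).map pvFix) := by
    cases hq : p with
    | nil => simp [pv_join_singleton]
    | cons a q =>
      rw [← hq]
      have hne : p ≠ [] := by simp [hq]
      have hcne : ((p.length : Int) == 0) = false := by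
        have : p.length ≠ 0 := by simpa [List.length_eq_zero_iff] using hne
        simp; omega
      rw [hcne]
      simp only [Bool.false_eq_true, if_false]
      rw [List.map_append, List.map_cons, List.map_nil,
        pv_join_snoc _ _ _ (by simpa using hne)]
  simp only [show (if !(PySem.Str.isIn "ON CONFLICT DO NOTHING" s) then
      String.ofList ((s.toList.reverse.dropWhile (· == ';')).reverse
                 ++ ("\nON CONFLICT DO NOTHING;").toList) else s) = pvFix s from rfl]
  rw [hcur]
  simp only [hbeq, Bool.false_eq_true, if_false]
  congr 1
  simp

-- …or fills up and is flushed
theorem pv_step_flush (bn : Nat) (p : List String) (batches : List String) (s : String)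
    (h : p.length + 1 = bn) :
    pvStepB (bn : Int) (batches, PySem.Str.join "\n\n" (p.map pvFix), (p.length : Int)) s
      = (batches ++ [PySem.Str.join "\n\n" ((p ++ [s]).map pvFix)], "", 0) := by
  unfold pvStepB
  have hbeq : (((p.length : Int) + 1) == (bn : Int)) = true := by
    simp; omega
  have hcur : (if ((p.length : Int) == 0) then pvFix s
        else String.ofList ((PySem.Str.join "\n\n" (p.map pvFix)).toList
          ++ ("\n\n").toList ++ (pvFix s).toList))
      = PySem.Str.join "\n\n" ((p ++ [s]).map pvFix) := by
    cases hq : p with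
    | nil => simp [pv_join_singleton]
    | cons a q =>
      rw [← hq]
      have hne : p ≠ [] := by simp [hq]
      have hcne : ((p.length : Int) == 0) = false := by
        have : p.length ≠ 0 := by simpa [List.length_eq_zero_iff] using hne
        simp; omega
      rw [hcne]
      simp only [Bool.false_eq_true, if_false]
      rw [List.map_append, List.map_cons, List.map_nil,
        pv_join_snoc _ _ _ (by simpa using hne)]
  simp only [show (if !(PySem.Str.isIn "ON CONFLICT DO NOTHING" s) then
      String.ofList ((s.toList.reverse.dropWhile (· == ';')).reverse
                 ++ ("\nON CONFLICT DO NOTHING;").toList) else s) = pvFix s from rfl]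
  rw [hcur]
  simp only [hbeq, if_true]

-- B's streaming loop: invariant over the pending (not yet flushed) statements p
theorem pv_B_inv (bn : Nat) (hb : 0 < bn) (xs : List String) :
    ∀ (p batches : List String), p.length < bn →
    pvFinal (xs.foldl (pvStepB (bn : Int))
        (batches, PySem.Str.join "\n\n" (p.map pvFix), (p.length : Int)))
      = batches ++ pvCj bn (p ++ xs) := by
  induction xs with
  | nil =>
    intro p batches hp
    rw [List.foldl_nil, List.append_nil]
    unfold pvFinal
    cases hq : p with
    | nil => simp [pvCj]
    | cons a t =>
      rw [← hq]
      have hne : p ≠ [] := by simp [hq]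
      have hlen : p.length ≠ 0 := by simpa [List.length_eq_zero_iff] using hne
      have hpos : ((p.length : Int) > 0) := by omega
      rw [if_pos hpos, pvCj, dif_neg hne]
      have h1 : p.take bn = p := List.take_of_length_le (by omega)
      have h2 : p.drop (max bn 1) = [] := List.drop_eq_nil_of_le (by omega)
      rw [h1, h2, pvCj]
      simp
  | cons s t ih =>
    intro p batches hp
    rw [List.foldl_cons]
    by_cases hflush : p.length + 1 = bn
    · rw [pv_step_flush bn p batches s hflush]
      have hzero := ih [] (batches ++ [PySem.Str.join "\n\n" ((p ++ [s]).map pvFix)]) hb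
      rw [List.map_nil, pv_join_nil, List.length_nil, Nat.cast_zero, List.nil_append] at hzero
      rw [hzero]
      have hne2 : p ++ s :: t ≠ [] := by simp
      have hsplit : p ++ s :: t = (p ++ [s]) ++ t := by simp
      have hlen2 : (p ++ [s]).length = bn := by simp; omega
      have hR : pvCj bn (p ++ s :: t)
          = PySem.Str.join "\n\n" ((p ++ [s]).map pvFix) :: pvCj bn t := by
        rw [pvCj, dif_neg hne2]
        rw [show (p ++ s :: t).take bn = p ++ [s] from by
          rw [hsplit]; exact List.take_left' hlen2]
        rw [show (p ++ s :: t).drop (max bn 1) = t from by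
          rw [hsplit, show max bn 1 = bn from by omega]; exact List.drop_left' hlen2]
      rw [hR]
      simp [List.append_assoc]
    · rw [pv_step_grow bn p batches s hflush]
      have := ih (p ++ [s]) batches (by simp; omega)
      rw [this]
      simp [List.append_assoc]

-- ===== VERDICT (by name: the statement is the Claim_ definition above) =====
theorem create_batch_migration_spec : Claim_equal_create_batch_migration := by
  intro statements batch_size _ hpre
  unfold Spec_create_batch_migration
  by_cases hneg : batch_size ≤ 0
  · -- batch_size < 0: A's range is empty, B's guard fires; both return []
    unfold create_batch_migration create_batch_migration_alt
    rw [if_pos hneg]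
    have hrange : PySem.List.pyRange 0 (statements.length : Int) batch_size = [] := by
      unfold PySem.List.pyRange
      rw [if_neg hpre]
      have h1 : ¬ (0 : Int) < batch_size := by omega
      have h2 : ¬ ((statements.length : Int) < 0) := by omega
      simp [h1, h2]
    rw [hrange]
    rfl
  · -- batch_size ≥ 1
    have hpos : 0 < batch_size := by omega
    have hcast : batch_size = (batch_size.toNat : Int) := by omega
    have hb : 0 < batch_size.toNat := by omega
    rw [hcast, pv_A_eq_cj statements batch_size.toNat hb]
    unfold create_batch_migration_alt
    rw [if_neg (by omega : ¬ ((batch_size.toNat : Int) ≤ 0))]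
    have hB := pv_B_inv batch_size.toNat hb statements [] [] hb
    rw [List.map_nil, pv_join_nil, List.length_nil, Nat.cast_zero, List.nil_append,
        List.nil_append] at hB
    rw [hB]
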